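-- pv_equiv track=rewrite | github.com/SSH1007/Algorithm | 프로그래머스/lv0/120921. 문자열 밀기/문자열 밀기.py | solution
-- ===== SOURCE A (Python) =====
-- def solution(A, B):
--     answer = -1
--     for n in range(len(A)):
--         if A == B:
--             answer = n
--             break
--         A = A[-1]+A[:-1]
--     return answer
-- ===== SOURCE B (Python) =====
-- def solution(A, B):
--     # Smallest right-shift of A equal to B = first occurrence of reversed B
--     # in reversed(A) doubled (single linear substring search).
--     if len(A) != len(B):
--         return -1
--     ra = A[::-1]
--     return (ra + ra).find(B[::-1])
-- ===== Notes on version B (the rewrite author's own statement) =====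
-- stated objective: faster
-- what changed: Instead of rotating A up to len(A) times and comparing whole strings each round (quadratic), B does one linear substring search: the smallest right-shift count is the first occurrence index of reversed(B) in reversed(A) doubled.
-- intended difference: On the single input A = B = '' (empty strings) A returns -1 because its range(0) loop never runs, while B returns 0, the intended minimal shift count since the strings are already equal. — e.g. on solution("", ""): A returns -1, B returns 0
import Mathlib
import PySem

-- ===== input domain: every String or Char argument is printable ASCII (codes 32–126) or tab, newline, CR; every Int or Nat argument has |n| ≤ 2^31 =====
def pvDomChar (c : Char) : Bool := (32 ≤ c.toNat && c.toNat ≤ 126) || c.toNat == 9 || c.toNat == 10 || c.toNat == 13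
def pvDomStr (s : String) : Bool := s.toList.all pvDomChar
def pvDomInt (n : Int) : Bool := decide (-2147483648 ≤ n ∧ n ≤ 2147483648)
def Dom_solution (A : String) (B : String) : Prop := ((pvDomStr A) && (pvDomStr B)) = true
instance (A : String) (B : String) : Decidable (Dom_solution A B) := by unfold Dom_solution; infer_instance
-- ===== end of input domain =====

-- B replaces A's quadratic rotate-and-compare loop with one linear substring search
-- (smallest right-shift = first index of reversed B in reversed A doubled); objective: faster.

-- ===== PORT A =====

-- A = A[-1] + A[:-1].  A[-1] is indexing; the loop only runs when A is nonempty
-- (fuel = len(A) ≥ 1 and the shift preserves the length), so the pyGetD default is unreachable.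
def pyShift (s : List Char) : List Char :=
  PySem.List.pyGetD s (-1) ' ' :: PySem.List.slice s none (some (-1))

-- for n in range(len(A)): if A == B: return n (break with answer = n); A = A[-1]+A[:-1]
def solutionLoop (B : List Char) : Nat → List Char → Nat → Int
  | 0, _, _ => -1
  | fuel + 1, s, n => if s = B then (n : Int) else solutionLoop B fuel (pyShift s) (n + 1)

def solution (A : String) (B : String) : Int :=
  solutionLoop B.toList A.toList.length A.toList 0

-- ===== PORT B =====

-- if len(A) != len(B): return -1
-- ra = A[::-1]                       (s[::-1] is reverse: PySem.Str.slice?_none_none_neg_one)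
-- return (ra + ra).find(B[::-1])
def solution_alt (A : String) (B : String) : Int :=
  if A.toList.length ≠ B.toList.length then -1
  else
    let ra := A.toList.reverse
    PySem.Chars.find (ra ++ ra) B.toList.reverse

-- ===== PRECONDITION & SPEC =====

-- On the single input A = B = '' A returns -1 (its range(0) loop never runs) while B returns 0,
-- the intended minimal shift count since the strings are already equal.
def D_solution (A : String) (B : String) : Prop := A = "" ∧ B = ""
instance (A : String) (B : String) : Decidable (D_solution A B) := by unfold D_solution; infer_instance

def Spec_solution (A : String) (B : String) (out : Int) : Prop := ¬ D_solution A B → out = solution_alt A B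
instance (A : String) (B : String) (out : Int) : Decidable (Spec_solution A B out) := by unfold Spec_solution; infer_instance

def pvDiffWitness_solution : String × String := ("", "")
def pvDiffWitnessOut_solution : Int × Int := (-1, 0)

-- ===== CLAIM (what is proved, stated in full; the proofs are below) =====
def Claim_unchanged_solution : Prop := ∀ (A : String) (B : String), Dom_solution A B → Spec_solution A B (solution A B)
def Claim_changed_solution : Prop := Dom_solution (pvDiffWitness_solution.1) (pvDiffWitness_solution.2) ∧ D_solution (pvDiffWitness_solution.1) (pvDiffWitness_solution.2) ∧ solution (pvDiffWitness_solution.1) (pvDiffWitness_solution.2) = pvDiffWitnessOut_solution.1 ∧ solution_alt (pvDiffWitness_solution.1) (pvDiffWitness_solution.2) = pvDiffWitnessOut_solution.2 ∧ pvDiffWitnessOut_solution.1 ≠ pvDiffWitnessOut_solution.2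
def Claim_exact_solution : Prop := ∀ (A : String) (B : String), Dom_solution A B → D_solution A B → solution A B ≠ solution_alt A B

-- ===== LEMMAS AND PROOFS =====

-- a after k right-shifts (for k ≤ a.length)
def rotK (a : List Char) (k : Nat) : List Char :=
  a.drop (a.length - k) ++ a.take (a.length - k)

theorem rotK_zero (a : List Char) : rotK a 0 = a := by simp [rotK]

theorem rotK_self (a : List Char) : rotK a a.length = a := by simp [rotK]

theorem pyShift_append_singleton (u v : List Char) (x : Char) :
    pyShift (u ++ (v ++ [x])) = x :: (u ++ v) := by
  simp [pyShift, ← List.append_assoc, PySem.List.pyGetD_neg_one_append_singleton,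
    PySem.List.slice_to_neg_one]

theorem pyShift_rotK (a : List Char) (k : Nat) (hk : k < a.length) :
    pyShift (rotK a k) = rotK a (k + 1) := by
  have hm : a.length - (k + 1) < a.length := by omega
  have h1 : a.length - k = (a.length - (k + 1)) + 1 := by omega
  rw [rotK, rotK, h1,
    List.take_succ_eq_append_getElem hm,
    pyShift_append_singleton,
    List.drop_eq_getElem_cons hm, List.cons_append]

theorem length_pyShift (s : List Char) (hs : s ≠ []) : (pyShift s).length = s.length := by
  have : 0 < s.length := List.length_pos_iff.mpr hs
  simp [pyShift, PySem.List.slice_to_neg_one]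
  omega

-- if the lengths differ the loop can never match and returns -1
theorem loop_len_ne (b : List Char) :
    ∀ (fuel : Nat) (s : List Char) (n : Nat), s ≠ [] → s.length ≠ b.length →
      solutionLoop b fuel s n = -1 := by
  intro fuel
  induction fuel with
  | zero => intro s n _ _; rfl
  | succ f ih =>
    intro s n hs hlen
    rw [solutionLoop, if_neg (by intro h; exact hlen (by rw [h]))]
    exact ih (pyShift s) (n + 1) (by simp [pyShift]) (by rw [length_pyShift s hs]; exact hlen)

-- the loop returns -1 when no shift in its window matches
theorem loop_none (b a : List Char) :
    ∀ (fuel k : Nat), k + fuel ≤ a.length →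
      (∀ j, k ≤ j → j < k + fuel → rotK a j ≠ b) →
      solutionLoop b fuel (rotK a k) k = -1 := by
  intro fuel
  induction fuel with
  | zero => intro k _ _; rfl
  | succ f ih =>
    intro k hle hne
    rw [solutionLoop, if_neg (hne k le_rfl (by omega)), pyShift_rotK a k (by omega)]
    exact ih (k + 1) (by omega) (fun j h1 h2 => hne j (by omega) (by omega))

-- the loop returns the first matching shift count m in its window
theorem loop_found (b a : List Char) (m : Nat) (hm : rotK a m = b) (hmn : m < a.length) :
    ∀ (fuel k : Nat), k + fuel = a.length → k ≤ m →
      (∀ j, k ≤ j → j < m → rotK a j ≠ b) →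
      solutionLoop b fuel (rotK a k) k = (m : Int) := by
  intro fuel
  induction fuel with
  | zero => intro k h1 h2 _; omega
  | succ f ih =>
    intro k h1 h2 hmin
    by_cases h : rotK a k = b
    · have hkm : k = m := by
        rcases Nat.lt_or_ge k m with h' | h'
        · exact absurd h (hmin k le_rfl h')
        · omega
      rw [solutionLoop, if_pos h, hkm]
    · have hklt : k < m := by
        rcases Nat.lt_or_ge k m with h' | h'
        · exact h'
        · have : k = m := by omega
          exact absurd (this ▸ hm) h
      rw [solutionLoop, if_neg h, pyShift_rotK a k (by omega)]
      exact ih (k + 1) (by omega) (by omega) (fun j hj1 hj2 => hmin j (by omega) hj2)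

-- occurrence of reversed b at index k in reversed a doubled ⟺ the k-th right shift of a is b
theorem occ_iff (a b : List Char) (hb : b.length = a.length) (k : Nat) (hk : k ≤ a.length) :
    (b.reverse <+: (a.reverse ++ a.reverse).drop k) ↔ rotK a k = b := by
  have hra : a.reverse.length = a.length := List.length_reverse
  rw [List.prefix_iff_eq_take,
    List.drop_append_of_le_length (by rw [hra]; exact hk),
    List.take_append]
  have h1 : (a.reverse.drop k).take b.reverse.length = a.reverse.drop k := by
    apply List.take_of_length_le
    simp [hb]
  have h2 : b.reverse.length - (a.reverse.drop k).length = k := by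
    simp [hb]; omega
  rw [h1, h2]
  have h3 : a.reverse.drop k = (a.take (a.length - k)).reverse := by
    rw [List.reverse_take]
    congr 1
    omega
  have h4 : a.reverse.take k = (a.drop (a.length - k)).reverse := by
    rw [List.reverse_drop]
    congr 1
    omega
  rw [h3, h4, ← List.reverse_append]
  constructor
  · intro h
    have := List.reverse_injective h
    rw [rotK, ← this]
  · intro h
    rw [rotK] at h
    rw [h]

-- ===== VERDICT (by name: the statement is the Claim_ definition above) =====
theorem solution_spec : Claim_unchanged_solution := by
  intro A B _ hD
  show solution A B = solution_alt A B
  rw [solution, solution_alt]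
  set a := A.toList with ha
  set b := B.toList with hbdef
  by_cases hlen : a.length = b.length
  · -- equal lengths
    rw [if_neg (by omega)]
    by_cases hnil : a = []
    · -- both empty: excluded by D_
      exfalso
      apply hD
      have hb0 : b = [] := by
        have : b.length = 0 := by rw [← hlen, hnil]; rfl
        exact List.length_eq_zero_iff.mp this
      exact ⟨String.toList_eq_nil_iff.mp (ha ▸ hnil), String.toList_eq_nil_iff.mp (hbdef ▸ hb0)⟩
    · have hn : 0 < a.length := List.length_pos_iff.mpr hnil
      set f := PySem.Chars.find (a.reverse ++ a.reverse) b.reverse with hf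
      by_cases hfneg : f = -1
      · -- no occurrence: no shift matches, the loop returns -1
        rw [hfneg]
        have hno : ∀ j : Nat, ¬ b.reverse <+: (a.reverse ++ a.reverse).drop j := by
          intro j hpre
          have h1 : PySem.Chars.isIn b.reverse (a.reverse ++ a.reverse) = true :=
            (PySem.Chars.exists_prefix_drop_iff_isIn _ _).mp ⟨j, hpre⟩
          have h2 : b.reverse <:+: (a.reverse ++ a.reverse) :=
            (PySem.Chars.isIn_iff_infix _ _).mp h1
          exact ((PySem.Chars.find_eq_neg_one_iff _ _).mp (hf ▸ hfneg)) h2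
        have := loop_none b a a.length 0 (by omega)
          (fun j h1 h2 => fun hc => hno j ((occ_iff a b hlen.symm j (by omega)).mpr hc))
        rw [rotK_zero] at this
        exact this
      · -- first occurrence at f = m < a.length; the loop returns m
        have hf0 : 0 ≤ f := by
          have := PySem.Chars.neg_one_le_find (a.reverse ++ a.reverse) b.reverse
          rw [← hf] at this
          omega
        obtain ⟨hpre, hmin⟩ := PySem.Chars.find_spec (s := a.reverse ++ a.reverse)
          (sub := b.reverse) hf0
        set m := f.toNat with hmdef
        have hmle : m ≤ a.length := by
          have hle := hpre.length_le
          simp [hlen] at hle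
          omega
        have hocc : rotK a m = b := (occ_iff a b hlen.symm m hmle).mp hpre
        have hmlt : m < a.length := by
          rcases Nat.lt_or_ge m a.length with h | h
          · exact h
          · exfalso
            have hmeq : m = a.length := by omega
            have h0 : rotK a 0 = b := by rw [rotK_zero, ← rotK_self a, ← hmeq, hocc]
            exact hmin 0 (by omega) ((occ_iff a b hlen.symm 0 (by omega)).mpr h0)
        have := loop_found b a m hocc hmlt a.length 0 (by omega) (by omega)
          (fun j h1 h2 => fun hc => hmin j (by omega) ((occ_iff a b hlen.symm j (by omega)).mpr hc))
        rw [rotK_zero] at this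
        rw [this, hmdef, Int.toNat_of_nonneg hf0]
  · -- different lengths: the loop never matches, both return -1
    rw [if_pos (by omega)]
    by_cases hnil : a = []
    · rw [hnil]; rfl
    · exact loop_len_ne b a.length a 0 hnil hlen

theorem solution_changed : Claim_changed_solution := by
  unfold Claim_changed_solution; decide

theorem solution_tight : Claim_exact_solution := by
  intro A B _ hD
  obtain ⟨h1, h2⟩ := hD
  subst h1; subst h2
  decide
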